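-- pv_equiv track=rewrite | github.com/jlazear/advent2019 | day10/star20.py | map_asteroids
-- ===== SOURCE A (Python) =====
-- from collections import defaultdict
-- from math import gcd, atan2, pi
--
-- def map_asteroids(coord, asteroids):
--     counter = defaultdict(list)
--     for coord2 in asteroids:
--         if coord == coord2:
--             continue
--         dx = coord2[0] - coord[0]
--         dy = coord2[1] - coord[1]
--         divisor = gcd(dx, dy)
--         counter[(dx//divisor, dy//divisor)].append(coord2)
--     return counter
-- ===== SOURCE B (Python) =====
-- from collections import defaultdict
-- from math import gcd
--
-- def map_asteroids(coord, asteroids):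
--     def direction(p):
--         dx = p[0] - coord[0]
--         dy = p[1] - coord[1]
--         g = gcd(dx, dy)
--         return (dx // g, dy // g)
--     survivors = [p for p in asteroids if p != coord]
--     keys = list(dict.fromkeys(direction(p) for p in survivors))
--     result = defaultdict(list)
--     for k in keys:
--         result[k] = [p for p in survivors if direction(p) == k]
--     return result
-- ===== Notes on version B (the rewrite author's own statement) =====
-- stated objective: alternative
-- what changed: Replaces the single hash-grouping pass (defaultdict append inside the loop) with a three-stage decomposition: filter survivors, deduplicate their reduced direction keys in first-occurrence order, then build each group by filtering the survivors per key.
import Mathlib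
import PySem

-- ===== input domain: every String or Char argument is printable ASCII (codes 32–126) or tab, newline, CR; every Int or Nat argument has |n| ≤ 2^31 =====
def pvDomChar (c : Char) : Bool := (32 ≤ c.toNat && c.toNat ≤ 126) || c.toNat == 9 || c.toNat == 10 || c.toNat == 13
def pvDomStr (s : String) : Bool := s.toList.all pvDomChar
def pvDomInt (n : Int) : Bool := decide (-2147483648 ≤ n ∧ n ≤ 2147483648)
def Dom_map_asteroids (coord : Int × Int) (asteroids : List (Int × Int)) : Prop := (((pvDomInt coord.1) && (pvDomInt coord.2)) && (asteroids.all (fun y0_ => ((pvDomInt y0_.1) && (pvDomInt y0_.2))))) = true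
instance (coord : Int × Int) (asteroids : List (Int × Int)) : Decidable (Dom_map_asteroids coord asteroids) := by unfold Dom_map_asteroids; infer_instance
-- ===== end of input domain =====

-- B groups survivors by deduplicated direction keys + per-key filters instead of A's single
-- defaultdict-append pass; same return value (the defaultdict is encoded as its items list).

-- ===== PORT A =====
def map_asteroids (coord : Int × Int) (asteroids : List (Int × Int)) : List (Int × Int × List (Int × Int)) :=
  let counter : PySem.Dict (Int × Int) (List (Int × Int)) :=
    asteroids.foldl (fun d coord2 =>
      if coord == coord2 then d
      else
        let dx := coord2.1 - coord.1
        let dy := coord2.2 - coord.2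
        let divisor : Int := (Int.gcd dx dy : Int)
        d.modify (PySem.Int.floordiv dx divisor, PySem.Int.floordiv dy divisor) [] (fun g => g ++ [coord2]))
      PySem.Dict.empty
  counter.items.map (fun p => (p.1.1, p.1.2, p.2))

-- ===== PORT B =====
def astDirection (coord p : Int × Int) : Int × Int :=
  let dx := p.1 - coord.1
  let dy := p.2 - coord.2
  let g : Int := (Int.gcd dx dy : Int)
  (PySem.Int.floordiv dx g, PySem.Int.floordiv dy g)

def map_asteroids_alt (coord : Int × Int) (asteroids : List (Int × Int)) : List (Int × Int × List (Int × Int)) :=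
  let survivors := asteroids.filter (fun p => !(p == coord))
  let keys := PySem.List.dedup (survivors.map (astDirection coord))
  keys.map (fun k => (k.1, k.2, survivors.filter (fun p => astDirection coord p == k)))

-- ===== PRECONDITION & SPEC =====
def Spec_map_asteroids (coord : Int × Int) (asteroids : List (Int × Int)) (out : List (Int × Int × List (Int × Int))) : Prop := out = map_asteroids_alt coord asteroids
instance (coord : Int × Int) (asteroids : List (Int × Int)) (out : List (Int × Int × List (Int × Int))) : Decidable (Spec_map_asteroids coord asteroids out) := by unfold Spec_map_asteroids; infer_instance

-- ===== CLAIM (what is proved, stated in full; the proofs are below) =====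
def Claim_equal_map_asteroids : Prop := ∀ (coord : Int × Int) (asteroids : List (Int × Int)), Dom_map_asteroids coord asteroids → Spec_map_asteroids coord asteroids (map_asteroids coord asteroids)

-- ===== LEMMAS AND PROOFS =====

-- A's "continue on coord == coord2" is folding over the filtered list.
lemma foldl_skip_eq_foldl_filter {α β : Type} [BEq α] [LawfulBEq α] (c : α) (g : β → α → β) :
    ∀ (l : List α) (d : β),
      l.foldl (fun d x => if c == x then d else g d x) d
        = (l.filter (fun p => !(p == c))).foldl g d := by
  intro l
  induction l with
  | nil => intro d; rfl
  | cons x xs ih =>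
    intro d
    by_cases h : c = x
    · subst h; simp [ih]
    · have h' : ¬ x = c := fun hxc => h hxc.symm
      simp [List.foldl_cons, h, h', ih]

lemma grouping_fold_eq (coord : Int × Int) (s : List (Int × Int)) :
    (s.foldl (fun (d : PySem.Dict (Int × Int) (List (Int × Int))) p =>
        d.modify (astDirection coord p) [] (fun g => g ++ [p])) PySem.Dict.empty).items
      = (PySem.List.dedup (s.map (astDirection coord))).map
          (fun k => (k, s.filter (fun p => astDirection coord p == k))) := by
  set D := s.foldl (fun (d : PySem.Dict (Int × Int) (List (Int × Int))) p =>
      d.modify (astDirection coord p) [] (fun g => g ++ [p])) PySem.Dict.empty with hD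
  have hnodup : D.keys.Nodup := by
    rw [hD]
    exact PySem.Dict.nodup_keys_foldl_modify_key s (astDirection coord) []
      (fun _ p => (fun g => g ++ [p])) PySem.Dict.empty (by simp)
  have hkeys : D.keys = PySem.List.dedup (s.map (astDirection coord)) := by
    rw [hD, PySem.Dict.keys_foldl_modify_key]
    simp [PySem.Set.update_nil_left]
  have hgetD : ∀ k, D.getD k [] = s.filter (fun p => astDirection coord p == k) := by
    intro k
    have hmap : D = (s.map (fun p => (astDirection coord p, p))).foldl
        (fun (d : PySem.Dict (Int × Int) (List (Int × Int))) q =>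
          d.modify q.1 [] (fun g => g ++ [q.2])) PySem.Dict.empty := by
      rw [hD, List.foldl_map]
    rw [hmap, PySem.Dict.getD_foldl_modify_append]
    simp [List.filter_map, Function.comp_def]
  rw [PySem.Dict.items_eq_map_keys D hnodup [], hkeys]
  exact List.map_congr_left (fun k _ => by rw [hgetD k])

-- ===== VERDICT (by name: the statement is the Claim_ definition above) =====
theorem map_asteroids_spec : Claim_equal_map_asteroids := by
  intro coord asteroids _
  unfold Spec_map_asteroids map_asteroids map_asteroids_alt
  have hfun : (fun (d : PySem.Dict (Int × Int) (List (Int × Int))) (coord2 : Int × Int) =>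
      if coord == coord2 then d
      else
        let dx := coord2.1 - coord.1
        let dy := coord2.2 - coord.2
        let divisor : Int := (Int.gcd dx dy : Int)
        d.modify (PySem.Int.floordiv dx divisor, PySem.Int.floordiv dy divisor) [] (fun g => g ++ [coord2]))
    = (fun (d : PySem.Dict (Int × Int) (List (Int × Int))) coord2 =>
        if coord == coord2 then d
        else d.modify (astDirection coord coord2) [] (fun g => g ++ [coord2])) := rfl
  simp only [hfun]
  rw [foldl_skip_eq_foldl_filter coord
      (fun (d : PySem.Dict (Int × Int) (List (Int × Int))) p =>
        d.modify (astDirection coord p) [] (fun g => g ++ [p])) asteroids PySem.Dict.empty,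
    grouping_fold_eq coord (asteroids.filter (fun p => !(p == coord)))]
  simp [List.map_map, Function.comp_def]
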